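-- pv_equiv track=rewrite | github.com/RebelHawk-TK/pod-design-generator | video_captions.py | extract_video_info
-- ===== SOURCE A (Python) =====
-- def extract_video_info(filename_stem: str) -> tuple[str, str]:
--     """Extract landmark ID and video type from filename.
--
--     Returns: (landmark_id, video_type) where video_type is 'promo', 'travel', or 'stock'.
--     """
--     for suffix in ("_travel_a", "_travel_b"):
--         if filename_stem.endswith(suffix):
--             return filename_stem[: -len(suffix)], "travel"
--     for suffix in ("_stock_a", "_stock_b"):
--         if filename_stem.endswith(suffix):
--             return filename_stem[: -len(suffix)], "stock"
--     return filename_stem, "promo"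
-- ===== SOURCE B (Python) =====
-- def extract_video_info(filename_stem: str) -> tuple[str, str]:
--     """Extract landmark ID and video type from filename.
--
--     Returns: (landmark_id, video_type) where video_type is 'promo', 'travel', or 'stock'.
--     """
--     head, _, tail = filename_stem.rpartition("_")
--     if tail in ("a", "b"):
--         base, sep, kind = head.rpartition("_")
--         if sep and kind in ("travel", "stock"):
--             return base, kind
--     return filename_stem, "promo"
-- ===== Notes on version B (the rewrite author's own statement) =====
-- stated objective: idiomatic
-- what changed: Instead of scanning four hard-coded suffixes with endswith and slicing, B splits the stem at its last two underscores with str.rpartition and validates the two fields (variant letter, video type), so the suffix list disappears.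
import Mathlib
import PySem

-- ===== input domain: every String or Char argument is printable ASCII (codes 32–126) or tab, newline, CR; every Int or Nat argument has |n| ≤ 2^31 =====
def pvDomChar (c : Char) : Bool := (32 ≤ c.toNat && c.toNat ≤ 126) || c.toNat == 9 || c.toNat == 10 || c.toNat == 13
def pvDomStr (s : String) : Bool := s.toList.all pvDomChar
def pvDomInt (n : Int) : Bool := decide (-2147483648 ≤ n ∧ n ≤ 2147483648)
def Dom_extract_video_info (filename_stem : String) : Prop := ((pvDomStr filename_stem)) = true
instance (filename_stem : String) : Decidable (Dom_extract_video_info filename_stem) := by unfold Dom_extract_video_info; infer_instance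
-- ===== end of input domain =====

-- B replaces A's four hard-coded endswith/slice suffix checks by splitting at the last two
-- underscores (str.rpartition) and validating the two fields; same cost, more idiomatic.

-- ===== PORT A =====
-- the two for-loops over literal suffix tuples unroll into the four checks, in order
def extract_video_info (filename_stem : String) : String × String :=
  if PySem.Str.endswith filename_stem "_travel_a" then
    (PySem.Str.slice filename_stem none (some (-9)), "travel")
  else if PySem.Str.endswith filename_stem "_travel_b" then
    (PySem.Str.slice filename_stem none (some (-9)), "travel")
  else if PySem.Str.endswith filename_stem "_stock_a" then
    (PySem.Str.slice filename_stem none (some (-8)), "stock")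
  else if PySem.Str.endswith filename_stem "_stock_b" then
    (PySem.Str.slice filename_stem none (some (-8)), "stock")
  else
    (filename_stem, "promo")

-- ===== PORT B =====
-- s.rpartition('_') on code points: none = separator not found (Python's ('', '', s));
-- some (h, t) = (part before the last '_', part after it)
def pvRPart (cs : List Char) : Option (List Char × List Char) :=
  match cs with
  | [] => none
  | c :: rest =>
    match pvRPart rest with
    | some (h, t) => some (c :: h, t)
    | none => if c = '_' then some ([], rest) else none

-- the body of B after 'head, _, tail = filename_stem.rpartition("_")'
def pvClassify (filename_stem : String) (head tail : List Char) : String × String :=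
  if tail = "a".toList ∨ tail = "b".toList then
    -- base, sep, kind = head.rpartition("_"); 'if sep' = the separator was found
    match pvRPart head with
    | some (base, kind) =>
      if kind = "travel".toList ∨ kind = "stock".toList then
        (String.ofList base, String.ofList kind)
      else
        (filename_stem, "promo")
    | none => (filename_stem, "promo")
  else
    (filename_stem, "promo")

def extract_video_info_alt (filename_stem : String) : String × String :=
  match pvRPart filename_stem.toList with
  | some (head, tail) => pvClassify filename_stem head tail
  | none => pvClassify filename_stem [] filename_stem.toList

-- ===== PRECONDITION & SPEC =====
def Spec_extract_video_info (filename_stem : String) (out : String × String) : Prop := out = extract_video_info_alt filename_stem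
instance (filename_stem : String) (out : String × String) : Decidable (Spec_extract_video_info filename_stem out) := by unfold Spec_extract_video_info; infer_instance

-- ===== CLAIM (what is proved, stated in full; the proofs are below) =====
def Claim_equal_extract_video_info : Prop := ∀ (filename_stem : String), Dom_extract_video_info filename_stem → Spec_extract_video_info filename_stem (extract_video_info filename_stem)

-- ===== LEMMAS AND PROOFS =====

theorem pvRPart_eq_none (cs : List Char) (h : '_' ∉ cs) : pvRPart cs = none := by
  induction cs with
  | nil => rfl
  | cons c rest ih =>
    simp only [List.mem_cons, not_or] at h
    rw [pvRPart, ih h.2, if_neg (fun hc => h.1 hc.symm)]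

theorem pvRPart_append (p t : List Char) (h : '_' ∉ t) :
    pvRPart (p ++ '_' :: t) = some (p, t) := by
  induction p with
  | nil => simp [pvRPart, pvRPart_eq_none t h]
  | cons c p ih => simp [pvRPart, ih]

theorem pvRPart_some (cs h t : List Char) (hr : pvRPart cs = some (h, t)) :
    cs = h ++ '_' :: t := by
  induction cs generalizing h t with
  | nil => simp [pvRPart] at hr
  | cons c rest ih =>
    rw [pvRPart] at hr
    cases hrest : pvRPart rest with
    | some p =>
      obtain ⟨h', t'⟩ := p
      rw [hrest] at hr
      cases hr
      simp [ih _ _ hrest]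
    | none =>
      rw [hrest] at hr
      by_cases hc : c = '_'
      · rw [if_pos hc] at hr
        cases hr
        simp [hc]
      · rw [if_neg hc] at hr
        exact absurd hr (by simp)

-- B's value when the stem decomposes as p ++ "_<kind>_<letter>"
theorem alt_of_suffix (s : String) (p mid t : List Char)
    (hmid : '_' ∉ mid) (ht : '_' ∉ t)
    (hs : s.toList = (p ++ '_' :: mid) ++ '_' :: t)
    (htail : t = "a".toList ∨ t = "b".toList)
    (hkind : mid = "travel".toList ∨ mid = "stock".toList) :
    extract_video_info_alt s = (String.ofList p, String.ofList mid) := by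
  have h1 : pvRPart s.toList = some (p ++ '_' :: mid, t) := by
    rw [hs]; exact pvRPart_append _ t ht
  have h2 : pvRPart (p ++ '_' :: mid) = some (p, mid) := pvRPart_append p mid hmid
  rcases htail with rfl | rfl <;> rcases hkind with rfl | rfl <;>
    · simp only [extract_video_info_alt, h1, pvClassify, h2]
      simp

-- B's value when no "_travel_x"/"_stock_x" suffix is present
theorem alt_of_no_suffix (s : String)
    (h1 : ¬ "_travel_a".toList <:+ s.toList) (h2 : ¬ "_travel_b".toList <:+ s.toList)
    (h3 : ¬ "_stock_a".toList <:+ s.toList) (h4 : ¬ "_stock_b".toList <:+ s.toList) :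
    extract_video_info_alt s = (s, "promo") := by
  unfold extract_video_info_alt
  cases hr : pvRPart s.toList with
  | none =>
    show pvClassify s [] s.toList = (s, "promo")
    unfold pvClassify
    split_ifs <;> rfl
  | some p =>
    obtain ⟨h, t⟩ := p
    have hcs := pvRPart_some _ _ _ hr
    show pvClassify s h t = (s, "promo")
    unfold pvClassify
    split_ifs with htail
    · cases hr2 : pvRPart h with
      | none => rfl
      | some q =>
        obtain ⟨base, kind⟩ := q
        have hh := pvRPart_some _ _ _ hr2
        show (if kind = "travel".toList ∨ kind = "stock".toList then
            (String.ofList base, String.ofList kind) else (s, "promo")) = (s, "promo")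
        by_cases hkind : kind = "travel".toList ∨ kind = "stock".toList
        · exfalso
          have hsuf : ('_' :: (kind ++ '_' :: t)) <:+ s.toList := by
            rw [hcs, hh, List.append_assoc]
            simpa using List.suffix_append base ('_' :: kind ++ '_' :: t)
          rcases hkind with rfl | rfl <;> rcases htail with rfl | rfl
          · exact h1 (by simpa using hsuf)
          · exact h2 (by simpa using hsuf)
          · exact h3 (by simpa using hsuf)
          · exact h4 (by simpa using hsuf)
        · rw [if_neg hkind]
    · rfl

theorem slice_of_suffix (s : String) (p suf : List Char) (k : Nat) (hk : 1 < k)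
    (hlen : suf.length = k) (hs : s.toList = p ++ suf) :
    PySem.Str.slice s none (some (-(OfNat.ofNat k))) = String.ofList p := by
  apply String.toList_injective
  rw [PySem.Str.toList_slice, PySem.Chars.slice_eq_listSlice,
      PySem.List.slice_to_neg_ofNat _ k hk, hs]
  simp [hlen, List.take_left]

-- ===== VERDICT (by name: the statement is the Claim_ definition above) =====
theorem extract_video_info_spec : Claim_equal_extract_video_info := by
  intro s _
  unfold Spec_extract_video_info extract_video_info
  split_ifs with h1 h2 h3 h4
  · obtain ⟨p, hp⟩ := (PySem.Chars.endswith_iff _ _).1 (by simpa [PySem.Str.endswith_eq] using h1)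
    rw [alt_of_suffix s p "travel".toList "a".toList (by decide) (by decide)
      (by rw [← hp]; simp) (Or.inl rfl) (Or.inl rfl),
      slice_of_suffix s p "_travel_a".toList 9 (by norm_num) (by decide) (by rw [← hp]; simp)]
    rw [show String.ofList "travel".toList = "travel" by decide]
  · obtain ⟨p, hp⟩ := (PySem.Chars.endswith_iff _ _).1 (by simpa [PySem.Str.endswith_eq] using h2)
    rw [alt_of_suffix s p "travel".toList "b".toList (by decide) (by decide)
      (by rw [← hp]; simp) (Or.inr rfl) (Or.inl rfl),
      slice_of_suffix s p "_travel_b".toList 9 (by norm_num) (by decide) (by rw [← hp]; simp)]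
    rw [show String.ofList "travel".toList = "travel" by decide]
  · obtain ⟨p, hp⟩ := (PySem.Chars.endswith_iff _ _).1 (by simpa [PySem.Str.endswith_eq] using h3)
    rw [alt_of_suffix s p "stock".toList "a".toList (by decide) (by decide)
      (by rw [← hp]; simp) (Or.inl rfl) (Or.inr rfl),
      slice_of_suffix s p "_stock_a".toList 8 (by norm_num) (by decide) (by rw [← hp]; simp)]
    rw [show String.ofList "stock".toList = "stock" by decide]
  · obtain ⟨p, hp⟩ := (PySem.Chars.endswith_iff _ _).1 (by simpa [PySem.Str.endswith_eq] using h4)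
    rw [alt_of_suffix s p "stock".toList "b".toList (by decide) (by decide)
      (by rw [← hp]; simp) (Or.inr rfl) (Or.inr rfl),
      slice_of_suffix s p "_stock_b".toList 8 (by norm_num) (by decide) (by rw [← hp]; simp)]
    rw [show String.ofList "stock".toList = "stock" by decide]
  · rw [alt_of_no_suffix s
      (fun hs => h1 (by rw [PySem.Str.endswith_eq]; exact (PySem.Chars.endswith_iff _ _).2 hs))
      (fun hs => h2 (by rw [PySem.Str.endswith_eq]; exact (PySem.Chars.endswith_iff _ _).2 hs))
      (fun hs => h3 (by rw [PySem.Str.endswith_eq]; exact (PySem.Chars.endswith_iff _ _).2 hs))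
      (fun hs => h4 (by rw [PySem.Str.endswith_eq]; exact (PySem.Chars.endswith_iff _ _).2 hs))]
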